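-- pv_equiv track=rewrite | github.com/HowieHz/osu-beatmap-to-mania-converter | src/processor/std_metadata_to_mania.py | any_metadata_to_mania
-- ===== SOURCE A (Python) =====
-- def any_metadata_to_mania(osu_file_metadata: list[str]) -> list[str]:
--     """将 osu 铺面的元数据转换成 osu!mania 的元数据
--
--     Args:
--         osu_file_metadata (list[str]): 未被转换的元数据列，每行应有换行符（"\\n"）
--
--     Returns:
--         list[str]: 转换后的元数据列，每行应有换行符（"\\n"）
--     """
--     # 找到目标索引然后替换，整个文件 Mode 开头的按理来说只有这一处
--     # 所以以防万一出现 "Mode:  0\n"，如果没找到，"Mode: 0\n"。就会去找第一个 Mode 开头之后替换。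
--     try:
--         osu_file_metadata[osu_file_metadata.index("Mode: 0\n")] = "Mode: 3\n"
--     except ValueError:
--         for line in osu_file_metadata:
--             if line.startswith("Mode:"):
--                 osu_file_metadata[osu_file_metadata.index(line)] = "Mode: 3\n"
--                 break
--     return osu_file_metadata
-- ===== SOURCE B (Python) =====
-- def any_metadata_to_mania(osu_file_metadata: list[str]) -> list[str]:
--     # One pass: record the first exact "Mode: 0\n" index and the first "Mode:"-prefixed
--     # index; the exact match wins, else fall back to the prefix match.
--     exact_idx = None
--     prefix_idx = None
--     for i, line in enumerate(osu_file_metadata):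
--         if exact_idx is None and line == "Mode: 0\n":
--             exact_idx = i
--         if prefix_idx is None and line.startswith("Mode:"):
--             prefix_idx = i
--     idx = exact_idx if exact_idx is not None else prefix_idx
--     if idx is not None:
--         osu_file_metadata[idx] = "Mode: 3\n"
--     return osu_file_metadata
-- ===== Notes on version B (the rewrite author's own statement) =====
-- stated objective: simpler
-- what changed: Replaced the try/except .index lookup plus a second prefix-scan loop (which calls .index again inside) by a single enumerate pass that records the first exact-match and first prefix-match indices, then assigns once.
import Mathlib
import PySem

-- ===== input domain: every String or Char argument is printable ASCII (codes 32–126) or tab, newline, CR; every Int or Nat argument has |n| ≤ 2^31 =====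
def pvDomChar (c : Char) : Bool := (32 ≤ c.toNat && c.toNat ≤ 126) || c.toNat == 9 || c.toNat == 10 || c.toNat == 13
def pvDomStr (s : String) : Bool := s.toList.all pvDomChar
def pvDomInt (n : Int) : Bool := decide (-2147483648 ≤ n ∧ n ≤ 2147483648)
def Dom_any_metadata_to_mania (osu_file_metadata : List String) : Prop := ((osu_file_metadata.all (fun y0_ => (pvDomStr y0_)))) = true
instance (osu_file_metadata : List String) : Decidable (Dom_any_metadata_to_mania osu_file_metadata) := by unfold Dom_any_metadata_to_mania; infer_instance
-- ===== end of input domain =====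

-- B replaces A's try/except .index + second prefix loop by a single enumerate pass
-- recording the first exact-match and first prefix-match index (simpler, one pass).
-- Both Pythons mutate the list in place identically; the equivalence proved is about the return value.


-- ===== PORT A =====
-- try: xs[xs.index("Mode: 0\n")] = "Mode: 3\n"
-- except ValueError: for line in xs: if line.startswith("Mode:"): xs[xs.index(line)] = "Mode: 3\n"; break
def any_metadata_to_mania (osu_file_metadata : List String) : List String :=
  match PySem.List.index? osu_file_metadata "Mode: 0\n" with
  | some i => osu_file_metadata.set i "Mode: 3\n"
  | none =>
    match osu_file_metadata.find? (fun l => PySem.Str.startswith l "Mode:") with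
    | some l =>
      match PySem.List.index? osu_file_metadata l with
      | some j => osu_file_metadata.set j "Mode: 3\n"
      | none => osu_file_metadata   -- unreachable: l ∈ xs
    | none => osu_file_metadata

-- ===== PORT B =====
-- one enumerate pass recording first exact and first prefix index, then one assignment
def any_metadata_to_mania_alt (osu_file_metadata : List String) : List String :=
  let acc := (PySem.List.enumerate osu_file_metadata 0).foldl
    (fun (acc : Option Int × Option Int) il =>
      ((if acc.1.isNone ∧ il.2 = "Mode: 0\n" then some il.1 else acc.1),
       (if acc.2.isNone ∧ PySem.Str.startswith il.2 "Mode:" then some il.1 else acc.2)))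
    (none, none)
  match (match acc.1 with | some i => some i | none => acc.2) with
  | some i => osu_file_metadata.set i.toNat "Mode: 3\n"
  | none => osu_file_metadata

-- ===== PRECONDITION & SPEC =====
def Spec_any_metadata_to_mania (osu_file_metadata : List String) (out : List String) : Prop := out = any_metadata_to_mania_alt osu_file_metadata
instance (osu_file_metadata : List String) (out : List String) : Decidable (Spec_any_metadata_to_mania osu_file_metadata out) := by unfold Spec_any_metadata_to_mania; infer_instance

-- ===== CLAIM (what is proved, stated in full; the proofs are below) =====
def Claim_equal_any_metadata_to_mania : Prop := ∀ (osu_file_metadata : List String), Dom_any_metadata_to_mania osu_file_metadata → Spec_any_metadata_to_mania osu_file_metadata (any_metadata_to_mania osu_file_metadata)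

-- ===== LEMMAS AND PROOFS =====

-- B's fold computes, shifted by the start index s, the first index of an exact match
-- (when a is still none) and the first index of a prefix match (when b is still none).
theorem pv_fold_char (xs : List String) (s : Int) (a b : Option Int) :
    (PySem.List.enumerate xs s).foldl
      (fun (acc : Option Int × Option Int) il =>
        ((if acc.1.isNone ∧ il.2 = "Mode: 0\n" then some il.1 else acc.1),
         (if acc.2.isNone ∧ PySem.Str.startswith il.2 "Mode:" then some il.1 else acc.2)))
      (a, b) =
    (a.orElse (fun _ => (xs.findIdx? (fun l => decide (l = "Mode: 0\n"))).map (fun k => s + (k : Int))),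
     b.orElse (fun _ => (xs.findIdx? (fun l => PySem.Str.startswith l "Mode:")).map (fun k => s + (k : Int)))) := by
  induction xs generalizing s a b with
  | nil => cases a <;> cases b <;> simp [PySem.List.enumerate_nil, Option.orElse]
  | cons x xs ih =>
    rw [PySem.List.enumerate_cons, List.foldl_cons, ih, List.findIdx?_cons, List.findIdx?_cons]
    refine Prod.ext ?_ ?_
    · cases hF : xs.findIdx? (fun l => decide (l = "Mode: 0\n")) <;>
        cases a <;> by_cases hx : x = "Mode: 0\n" <;>
        simp [hF, hx, Option.orElse] <;> omega
    · cases hF : xs.findIdx? (fun l => PySem.Str.startswith l "Mode:") <;>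
        cases b <;> cases hx : PySem.Str.startswith x "Mode:" <;>
        simp [hF, hx, Option.orElse] <;> omega

-- In A's fallback branch: the first prefix-matching line occurs first at the index
-- where find? located it (an earlier equal string would itself be a prefix match).
theorem pv_index_find (xs : List String) (l : String)
    (h : xs.find? (fun t => PySem.Str.startswith t "Mode:") = some l) :
    PySem.List.index? xs l = xs.findIdx? (fun t => PySem.Str.startswith t "Mode:") := by
  induction xs with
  | nil => simp at h
  | cons x xs ih =>
    rw [List.find?_cons] at h
    rw [List.findIdx?_cons]
    cases hx : PySem.Str.startswith x "Mode:" with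
    | true =>
      rw [hx] at h
      have hxl : x = l := by simpa using h
      subst hxl
      rw [PySem.List.index?_cons_self]
      simp
    | false =>
      rw [hx] at h
      have hne : x ≠ l := by
        rintro rfl
        exact absurd (List.find?_some h) (by simpa using hx)
      rw [PySem.List.index?_cons_of_ne xs hne, ih h]
      simp

-- ===== VERDICT (by name: the statement is the Claim_ definition above) =====
theorem any_metadata_to_mania_spec : Claim_equal_any_metadata_to_mania := by
  intro xs _
  unfold Spec_any_metadata_to_mania any_metadata_to_mania any_metadata_to_mania_alt
  rw [pv_fold_char]
  dsimp only
  have hfun : (fun x : String => x == "Mode: 0\n") = (fun l : String => decide (l = "Mode: 0\n")) := by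
    funext t
    by_cases h : t = "Mode: 0\n" <;> simp [h]
  have hIdx : PySem.List.index? xs "Mode: 0\n" = xs.findIdx? (fun l => decide (l = "Mode: 0\n")) := by
    rw [PySem.List.index?_eq_idxOf?, List.idxOf?, hfun]
  cases hE : xs.findIdx? (fun l => decide (l = "Mode: 0\n")) with
  | some i =>
    rw [hIdx, hE]
    simp [Option.orElse]
  | none =>
    rw [hIdx, hE]
    dsimp only
    cases hF : xs.find? (fun t => PySem.Str.startswith t "Mode:") with
    | none =>
      have hP : xs.findIdx? (fun l => PySem.Str.startswith l "Mode:") = none :=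
        List.findIdx?_eq_none_iff.mpr (fun y hy => by
          have := List.find?_eq_none.mp hF y hy
          simpa using this)
      rw [hP]
      simp [Option.orElse]
    | some l =>
      have hPs : ∃ j, xs.findIdx? (fun t => PySem.Str.startswith t "Mode:") = some j := by
        cases hP : xs.findIdx? (fun t => PySem.Str.startswith t "Mode:") with
        | none =>
          exact absurd (List.findIdx?_eq_none_iff.mp hP l (List.mem_of_find?_eq_some hF))
            (by simpa using List.find?_some hF)
        | some j => exact ⟨j, rfl⟩
      obtain ⟨j, hP⟩ := hPs
      dsimp only
      rw [pv_index_find xs l hF, hP]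
      simp [Option.orElse]
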